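-- pv_equiv track=rewrite | github.com/akakss225/Python_tutorial | CREMA.py | countMatches
-- ===== SOURCE A (Python) =====
-- from collections import deque
--
-- def bfs(y, x, check, grid):
--     result = []
--     dy = [0, 1, 0 , -1]
--     dx = [1, 0, -1, 0]
--
--     q = deque([[y, x]])
--     check[y][x] = True
--     while q:
--         cur_y, cur_x = q.popleft()
--         result.append([cur_x, cur_y])
--         for k in range(4):
--             next_y = dy[k] + cur_y
--             next_x = dx[k] + cur_x
--             if 0 <= next_x < len(grid[0]) and 0 <= next_y < len(grid):
--                 if grid[next_y][next_x] == "1" and check[next_y][next_x] == False: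
--                     check[next_y][next_x] = True
--                     q.append([next_y, next_x])
--     return result
--
-- def countMatches(grid1, grid2):
--     answer = 0
--     g1 = []
--     check_g1 = [[False] * len(grid1[0]) for i in range(len(grid1))]
--     g2 = []
--     check_g2 = [[False] * len(grid2[0]) for i in range(len(grid2))]
--
--     for i in range(len(grid1)):
--         for j in range(len(grid1[0])):
--             if grid1[i][j] == "1" and check_g1[i][j] == False:
--                 g1.append(bfs(i, j, check_g1, grid1))
--     for i in range(len(grid2)):
--         for j in range(len(grid2[0])):
--             if grid2[i][j] == "1" and check_g2[i][j] == False: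
--                 g2.append(bfs(i, j, check_g2, grid2))
--
--     for i in g1:
--         if i in g2:
--             answer += 1
--
--     return answer
-- ===== SOURCE B (Python) =====
-- def countMatches(grid1, grid2):
--     # Flood fill by set saturation: each island is grown as a set of cells until
--     # it stops changing; islands are matched between grids as frozensets of
--     # absolute (row, col) coordinates instead of A's ordered BFS lists.
--     def components(grid):
--         rows = len(grid)
--         cols = len(grid[0]) if grid else 0
--         comps = []
--         seen = set()
--         for y in range(rows):
--             for x in range(cols):
--                 if grid[y][x] == "1" and (y, x) not in seen:
--                     comp = {(y, x)}
--                     for _ in range(rows * cols):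
--                         grown = set(comp)
--                         for (cy, cx) in comp:
--                             for ny, nx in ((cy, cx + 1), (cy + 1, cx), (cy, cx - 1), (cy - 1, cx)):
--                                 if 0 <= ny < rows and 0 <= nx < cols and grid[ny][nx] == "1":
--                                     grown.add((ny, nx))
--                         if grown == comp:
--                             break
--                         comp = grown
--                     seen |= comp
--                     comps.append(frozenset(comp))
--         return comps
--     c2 = components(grid2)
--     return sum(1 for c in components(grid1) if c in c2)
-- ===== Notes on version B (the rewrite author's own statement) =====
-- stated objective: alternative
-- what changed: A discovers each island with a deque-based BFS over a mutable boolean visited matrix and counts islands by comparing the ordered BFS coordinate lists; B grows each island as a coordinate set by repeated neighbourhood saturation (no queue, no visited matrix: a single seen-set) and counts islands by frozenset equality of absolute cell sets.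
import Mathlib
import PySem

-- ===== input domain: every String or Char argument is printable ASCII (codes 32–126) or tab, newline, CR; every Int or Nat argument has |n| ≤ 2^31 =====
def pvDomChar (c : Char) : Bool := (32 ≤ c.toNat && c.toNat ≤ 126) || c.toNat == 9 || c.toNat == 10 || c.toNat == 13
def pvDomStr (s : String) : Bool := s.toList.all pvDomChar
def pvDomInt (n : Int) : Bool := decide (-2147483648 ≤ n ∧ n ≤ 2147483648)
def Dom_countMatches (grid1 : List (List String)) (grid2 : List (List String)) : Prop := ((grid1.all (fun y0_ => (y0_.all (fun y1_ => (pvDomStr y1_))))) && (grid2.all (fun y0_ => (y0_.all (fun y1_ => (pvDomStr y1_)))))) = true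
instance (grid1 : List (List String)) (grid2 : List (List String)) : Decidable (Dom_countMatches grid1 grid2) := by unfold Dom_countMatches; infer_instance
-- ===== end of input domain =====

-- B replaces A's per-island ordered BFS (queue + boolean visited matrix, islands
-- matched as ordered coordinate lists) by a set-saturation flood fill whose islands
-- are coordinate SETS, matched by set equality; objective: alternative algorithm.

-- ===== PORT A =====
-- grid[y][x] (guards in A always keep the indices in range; default never observed under Pre_)
def pvCellS (g : List (List String)) (y x : Int) : String :=
  if 0 ≤ y ∧ 0 ≤ x then (g.getD y.toNat []).getD x.toNat "" else ""

-- check[y][x] (out-of-range reads as True only outside Pre_; in range it is the stored Bool)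
def pvGetB (c : List (List Bool)) (y x : Int) : Bool :=
  if 0 ≤ y ∧ 0 ≤ x then (c.getD y.toNat []).getD x.toNat true else true

-- check[y][x] = True
def pvSetB (c : List (List Bool)) (y x : Int) : List (List Bool) :=
  if 0 ≤ y ∧ 0 ≤ x then c.modify y.toNat (fun row => row.set x.toNat true) else c

-- number of False entries of check: termination measure for the while-loop
def pvCntF (c : List (List Bool)) : Nat := (c.map (fun r => r.count false)).sum

-- the four (dy, dx) direction pairs of A
def pvBfsDirs : List (Int × Int) := [(0, 1), (1, 0), (0, -1), (-1, 0)]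

-- body of A's `for k in range(4):` (state = (check, q))
def pvBfsStep (grid : List (List String)) (cy cx : Int)
    (st : List (List Bool) × List (Int × Int)) (d : Int × Int) :
    List (List Bool) × List (Int × Int) :=
  let ny := d.1 + cy
  let nx := d.2 + cx
  if 0 ≤ nx ∧ nx < ((grid.headD []).length : Int) ∧ 0 ≤ ny ∧ ny < (grid.length : Int) then
    if pvCellS grid ny nx = "1" ∧ pvGetB st.1 ny nx = false then
      (pvSetB st.1 ny nx, st.2 ++ [(ny, nx)])
    else st
  else st

lemma pvCntF_modify (c : List (List Bool)) (i : Nat) (f : List Bool → List Bool)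
    (row : List Bool) (hrow : getElem? c i = some row) :
    pvCntF (c.modify i f) + row.count false = pvCntF c + (f row).count false := by
  induction c generalizing i with
  | nil => simp at hrow
  | cons hd tl ih =>
    cases i with
    | zero =>
      simp only [List.getElem?_cons_zero, Option.some.injEq] at hrow
      subst hrow
      simp [pvCntF, List.modify]
      omega
    | succ n =>
      simp only [List.getElem?_cons_succ] at hrow
      have := ih n hrow
      have heq : (hd :: tl).modify (n + 1) f = hd :: tl.modify n f := rfl
      rw [heq]
      simp only [pvCntF, List.map_cons, List.sum_cons] at *
      omega

lemma pvCntF_setB_lt (c : List (List Bool)) (y x : Int) (h : pvGetB c y x = false) :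
    pvCntF (pvSetB c y x) < pvCntF c := by
  unfold pvGetB at h
  split at h
  case isFalse => simp at h
  case isTrue hyx =>
    unfold pvSetB
    rw [if_pos hyx]
    simp only [List.getD_eq_getElem?_getD] at h
    cases hrow : (getElem? c y.toNat) with
    | none => rw [hrow] at h; simp at h
    | some row =>
      rw [hrow] at h
      simp only [Option.getD_some] at h
      cases hx : (getElem? row x.toNat) with
      | none => rw [hx] at h; simp at h
      | some b =>
        rw [hx] at h
        simp only [Option.getD_some] at h
        subst h
        obtain ⟨hxlt, hval⟩ := List.getElem?_eq_some_iff.mp hx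
        have hmem : false ∈ row := List.mem_of_getElem? hx
        have hcnt : (row.set x.toNat true).count false < row.count false := by
          rw [List.count_set hxlt, hval]
          have hpos : 0 < row.count false := List.count_pos_iff.mpr hmem
          simp
          omega
        have hmod := pvCntF_modify c y.toNat (fun r => r.set x.toNat true) row hrow
        simp only at hmod
        omega

lemma pvStep_measure (grid : List (List String)) (cy cx : Int)
    (st : List (List Bool) × List (Int × Int)) (d : Int × Int) :
    pvCntF (pvBfsStep grid cy cx st d).1 + (pvBfsStep grid cy cx st d).2.length ≤
      pvCntF st.1 + st.2.length := by
  unfold pvBfsStep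
  dsimp only
  split
  case isFalse => exact le_refl _
  case isTrue hb =>
    split
    case isFalse => exact le_refl _
    case isTrue hg =>
      have := pvCntF_setB_lt st.1 _ _ hg.2
      simp only [List.length_append, List.length_cons, List.length_nil]
      omega

lemma pvFold_measure (grid : List (List String)) (cy cx : Int) :
    ∀ (ds : List (Int × Int)) (check : List (List Bool)) (q : List (Int × Int)),
    pvCntF (ds.foldl (pvBfsStep grid cy cx) (check, q)).1 +
      (ds.foldl (pvBfsStep grid cy cx) (check, q)).2.length ≤ pvCntF check + q.length := by
  intro ds
  induction ds with
  | nil => intro check q; simp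
  | cons d ds ih =>
    intro check q
    have h1 := pvStep_measure grid cy cx (check, q) d
    have h2 := ih (pvBfsStep grid cy cx (check, q) d).1 (pvBfsStep grid cy cx (check, q) d).2
    simp only [List.foldl_cons] at *
    rw [Prod.mk.eta] at h2
    omega

-- A's `while q:` loop (returns (result, check))
def pvBfsLoop (grid : List (List String)) (check : List (List Bool))
    (q : List (Int × Int)) (res : List (Int × Int)) : List (Int × Int) × List (List Bool) :=
  match q with
  | [] => (res, check)
  | c :: q' =>
      let st := pvBfsDirs.foldl (pvBfsStep grid c.1 c.2) (check, q')
      pvBfsLoop grid st.1 st.2 (res ++ [(c.2, c.1)])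
termination_by pvCntF check + q.length
decreasing_by
  have h := pvFold_measure grid c.1 c.2 pvBfsDirs check q'
  simp only [List.length_cons]
  omega

-- A's bfs (check is mutated in Python; the port returns the new check)
def pvBfs (y x : Int) (check : List (List Bool)) (grid : List (List String)) :
    List (Int × Int) × List (List Bool) :=
  pvBfsLoop grid (pvSetB check y x) [(y, x)] []

-- A's double scan loop (code identical for grid1 and grid2)
def pvScanA (grid : List (List String)) : List (List (Int × Int)) × List (List Bool) :=
  (List.range grid.length).foldl (fun st (i : Nat) =>
    (List.range (grid.headD []).length).foldl
      (fun (st : List (List (Int × Int)) × List (List Bool)) (j : Nat) =>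
        if pvCellS grid (i : Int) (j : Int) = "1" ∧ pvGetB st.2 (i : Int) (j : Int) = false then
          let r := pvBfs (i : Int) (j : Int) st.2 grid
          (st.1 ++ [r.1], r.2)
        else st) st) st0
where st0 : List (List (Int × Int)) × List (List Bool) :=
  ([], List.replicate grid.length (List.replicate (grid.headD []).length false))

def countMatches (grid1 : List (List String)) (grid2 : List (List String)) : Int :=
  let g1 := (pvScanA grid1).1
  let g2 := (pvScanA grid2).1
  g1.foldl (fun answer i => if i ∈ g2 then answer + 1 else answer) 0

-- ===== PORT B =====
-- the four neighbours of (cy, cx) in Source B's order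
def altNbrs (cy cx : Int) : List (Int × Int) :=
  [(cy, cx + 1), (cy + 1, cx), (cy, cx - 1), (cy - 1, cx)]

-- one saturation pass: grown = comp plus all in-grid "1"-neighbours of comp cells
def altGrow (grid : List (List String)) (rows cols : Nat) (comp : PySem.Set (Int × Int)) :
    PySem.Set (Int × Int) :=
  comp.foldl (fun grown c =>
    (altNbrs c.1 c.2).foldl (fun grown n =>
      if 0 ≤ n.1 ∧ n.1 < (rows : Int) ∧ 0 ≤ n.2 ∧ n.2 < (cols : Int) ∧ pvCellS grid n.1 n.2 = "1"
      then PySem.Set.add grown n else grown) grown) comp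

-- Source B's `for _ in range(rows*cols): … if grown == comp: break`
def altSat (grid : List (List String)) (rows cols : Nat) :
    Nat → PySem.Set (Int × Int) → PySem.Set (Int × Int)
  | 0, comp => comp
  | k + 1, comp =>
      let grown := altGrow grid rows cols comp
      if PySem.Set.equal grown comp then comp else altSat grid rows cols k grown

-- Source B's components(grid)
def altComps (grid : List (List String)) : List (PySem.Set (Int × Int)) :=
  let rows := grid.length
  let cols := (grid.headD []).length
  ((List.range rows).foldl (fun st (y : Nat) =>
    (List.range cols).foldl
      (fun (st : List (PySem.Set (Int × Int)) × PySem.Set (Int × Int)) (x : Nat) =>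
        if pvCellS grid (y : Int) (x : Int) = "1" ∧ ¬ (((y : Int), (x : Int)) ∈ st.2) then
          let comp := altSat grid rows cols (rows * cols)
            (PySem.Set.ofList [((y : Int), (x : Int))])
          (st.1 ++ [comp], PySem.Set.union st.2 comp)
        else st) st) ([], PySem.Set.empty)).1

def countMatches_alt (grid1 : List (List String)) (grid2 : List (List String)) : Int :=
  let c2 := altComps grid2
  ((altComps grid1).map
    (fun c => if (c2.any (fun s => PySem.Set.equal c s)) then (1 : Int) else 0)).sum

-- ===== PRECONDITION & SPEC =====
-- Pre_ excludes exactly the inputs where Python A raises IndexError: a row shorter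
-- than row 0 (the scan indexes grid[i][j] for every j < len(grid[0])).  The Lean
-- ports are total (lookups via getD) and the equivalence proof below holds for all
-- inputs; Pre_ only delimits where Python A returns a value at all.
def Pre_countMatches (grid1 : List (List String)) (grid2 : List (List String)) : Prop :=
  (∀ r ∈ grid1, (grid1.headD []).length ≤ r.length) ∧
  (∀ r ∈ grid2, (grid2.headD []).length ≤ r.length)

instance (grid1 : List (List String)) (grid2 : List (List String)) :
    Decidable (Pre_countMatches grid1 grid2) := by unfold Pre_countMatches; infer_instance

def pvWitness_countMatches : List (List String) × List (List String) :=
  ([["1", "0"], ["1", "1"]], [["1", "1"], ["1", "0"]])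

def Spec_countMatches (grid1 : List (List String)) (grid2 : List (List String)) (out : Int) :
    Prop := out = countMatches_alt grid1 grid2

instance (grid1 : List (List String)) (grid2 : List (List String)) (out : Int) :
    Decidable (Spec_countMatches grid1 grid2 out) := by unfold Spec_countMatches; infer_instance

-- ===== CLAIM (what is proved, stated in full; the proofs are below) =====
def Claim_equal_countMatches : Prop := ∀ (grid1 : List (List String)) (grid2 : List (List String)), Dom_countMatches grid1 grid2 → Pre_countMatches grid1 grid2 → Spec_countMatches grid1 grid2 (countMatches grid1 grid2)

-- ===== LEMMAS AND PROOFS =====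

-- cells are (y, x) : Int × Int
def pvInB (g : List (List String)) (p : Int × Int) : Bool :=
  decide (0 ≤ p.1) && decide (p.1 < (g.length : Int)) &&
  decide (0 ≤ p.2) && decide (p.2 < ((g.headD []).length : Int))

def pvOne (g : List (List String)) (p : Int × Int) : Bool :=
  pvInB g p && decide (pvCellS g p.1 p.2 = "1")

def pvDirs4 (p : Int × Int) : List (Int × Int) :=
  pvBfsDirs.map (fun d => (d.1 + p.1, d.2 + p.2))

def pvGrow (g : List (List String)) (T : Finset (Int × Int)) : Finset (Int × Int) :=
  T ∪ T.biUnion (fun p => ((pvDirs4 p).filter (fun n => pvOne g n)).toFinset)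

def pvN (g : List (List String)) : Nat := g.length * (g.headD []).length

def pvComp (g : List (List String)) (s : Int × Int) : Finset (Int × Int) :=
  (pvGrow g)^[pvN g] {s}

-- abstract BFS over a fixed cell set S (reference object for both ports)
def pvAbsStep (S : Finset (Int × Int)) (st : Finset (Int × Int) × List (Int × Int))
    (n : Int × Int) : Finset (Int × Int) × List (Int × Int) :=
  if n ∈ S ∧ n ∉ st.1 then (insert n st.1, st.2 ++ [n]) else st

lemma pvAbsStep_measure (S : Finset (Int × Int)) (st : Finset (Int × Int) × List (Int × Int))
    (n : Int × Int) :
    (S \ (pvAbsStep S st n).1).card + (pvAbsStep S st n).2.length ≤ (S \ st.1).card + st.2.length := by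
  unfold pvAbsStep
  split
  case isFalse => exact le_refl _
  case isTrue h =>
    have hmem : n ∈ S \ st.1 := Finset.mem_sdiff.mpr ⟨h.1, h.2⟩
    have : S \ insert n st.1 = (S \ st.1).erase n := by
      ext a
      simp only [Finset.mem_sdiff, Finset.mem_insert, Finset.mem_erase]
      tauto
    rw [this]
    have := Finset.card_erase_of_mem hmem
    have hpos : 0 < (S \ st.1).card := Finset.card_pos.mpr ⟨n, hmem⟩
    simp only [List.length_append, List.length_cons, List.length_nil]
    omega

lemma pvAbsFold_measure (S : Finset (Int × Int)) :
    ∀ (ds : List (Int × Int)) (vis : Finset (Int × Int)) (q : List (Int × Int)),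
    (S \ (ds.foldl (pvAbsStep S) (vis, q)).1).card + (ds.foldl (pvAbsStep S) (vis, q)).2.length ≤
      (S \ vis).card + q.length := by
  intro ds
  induction ds with
  | nil => intro vis q; simp
  | cons d ds ih =>
    intro vis q
    have h1 := pvAbsStep_measure S (vis, q) d
    have h2 := ih (pvAbsStep S (vis, q) d).1 (pvAbsStep S (vis, q) d).2
    simp only [List.foldl_cons] at *
    rw [Prod.mk.eta] at h2
    omega

def pvAbsLoop (S : Finset (Int × Int)) (vis : Finset (Int × Int))
    (q : List (Int × Int)) (res : List (Int × Int)) : List (Int × Int) × Finset (Int × Int) :=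
  match q with
  | [] => (res, vis)
  | c :: q' =>
      let st := (pvDirs4 c).foldl (pvAbsStep S) (vis, q')
      pvAbsLoop S st.1 st.2 (res ++ [(c.2, c.1)])
termination_by (S \ vis).card + q.length
decreasing_by
  have h := pvAbsFold_measure S (pvDirs4 c) vis q'
  simp only [List.length_cons]
  omega

def pvRun (S : Finset (Int × Int)) (s : Int × Int) : List (Int × Int) :=
  (pvAbsLoop S {s} [s] []).1

def swapF (res : List (Int × Int)) : Finset (Int × Int) :=
  (res.map (fun c => (c.2, c.1))).toFinset

def rmle (p q : Int × Int) : Prop := p.1 < q.1 ∨ (p.1 = q.1 ∧ p.2 ≤ q.2)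

-- ---------- matrix layer ----------
def Shaped (g : List (List String)) (c : List (List Bool)) : Prop :=
  c.length = g.length ∧ ∀ r ∈ c, r.length = (g.headD []).length

def MarkRel (g : List (List String)) (c : List (List Bool)) (V : Finset (Int × Int)) : Prop :=
  Shaped g c ∧ ∀ p : Int × Int, (pvGetB c p.1 p.2 = true ↔ (pvInB g p = false ∨ p ∈ V))

lemma mem_modify_cases {A : Type} (f : A → A) :
    ∀ (l : List A) (i : Nat) (r : A), r ∈ l.modify i f → r ∈ l ∨ ∃ r' ∈ l, r = f r' := by
  intro l
  induction l with
  | nil => intro i r hr; rw [List.modify_nil] at hr; simp at hr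
  | cons hd tl ih =>
    intro i r hr
    cases i with
    | zero =>
      have : (hd :: tl).modify 0 f = f hd :: tl := rfl
      rw [this] at hr
      rcases List.mem_cons.mp hr with h1 | h1
      · exact Or.inr ⟨hd, List.mem_cons_self, h1⟩
      · exact Or.inl (List.mem_cons_of_mem _ h1)
    | succ n =>
      have : (hd :: tl).modify (n + 1) f = hd :: tl.modify n f := rfl
      rw [this] at hr
      rcases List.mem_cons.mp hr with h1 | h1
      · exact Or.inl (h1 ▸ List.mem_cons_self)
      · rcases ih n r h1 with h2 | ⟨r', hr', he⟩
        · exact Or.inl (List.mem_cons_of_mem _ h2)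
        · exact Or.inr ⟨r', List.mem_cons_of_mem _ hr', he⟩

lemma shaped_setB (g : List (List String)) (c : List (List Bool)) (y x : Int)
    (h : Shaped g c) : Shaped g (pvSetB c y x) := by
  unfold pvSetB
  split
  case isFalse => exact h
  case isTrue =>
    refine ⟨by rw [List.length_modify]; exact h.1, ?_⟩
    intro r hr
    rcases mem_modify_cases _ c y.toNat r hr with h1 | ⟨r', hr', he⟩
    · exact h.2 r h1
    · rw [he, List.length_set]
      exact h.2 r' hr'

lemma pvGetB_eq (c : List (List Bool)) (y x : Int) :
    pvGetB c y x =
      if 0 ≤ y ∧ 0 ≤ x then ((getElem? ((getElem? c y.toNat).getD []) x.toNat).getD true)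
      else true := by
  unfold pvGetB
  simp only [List.getD_eq_getElem?_getD]

lemma pvInB_iff (g : List (List String)) (p : Int × Int) :
    pvInB g p = true ↔
      (0 ≤ p.1 ∧ p.1 < (g.length : Int) ∧ 0 ≤ p.2 ∧ p.2 < ((g.headD []).length : Int)) := by
  unfold pvInB
  simp only [Bool.and_eq_true, decide_eq_true_eq]
  tauto

lemma pvGetB_setB_self (g : List (List String)) (c : List (List Bool)) (p : Int × Int)
    (hs : Shaped g c) (hp : pvInB g p = true) :
    pvGetB (pvSetB c p.1 p.2) p.1 p.2 = true := by
  rw [pvInB_iff] at hp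
  obtain ⟨h1, h2, h3, h4⟩ := hp
  have hyx : 0 ≤ p.1 ∧ 0 ≤ p.2 := ⟨h1, h3⟩
  have hylt : p.1.toNat < c.length := by rw [hs.1]; omega
  rw [pvGetB_eq, if_pos hyx]
  unfold pvSetB
  rw [if_pos hyx, List.getElem?_modify]
  cases hrow : (getElem? c p.1.toNat) with
  | none => rw [List.getElem?_eq_none_iff] at hrow; omega
  | some row =>
    have hrlen : row.length = (g.headD []).length := hs.2 row (List.mem_of_getElem? hrow)
    have hxlt : p.2.toNat < row.length := by omega
    simp only [Option.map_eq_map, Option.map_some, Option.getD_some]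
    simp only [if_true]
    rw [List.getElem?_set, if_pos rfl, if_pos hxlt]
    simp

lemma pvGetB_setB_ne (c : List (List Bool)) (y x y' x' : Int) (hne : (y', x') ≠ (y, x)) :
    pvGetB (pvSetB c y x) y' x' = pvGetB c y' x' := by
  unfold pvSetB
  split
  case isFalse => rfl
  case isTrue hyx =>
    rw [pvGetB_eq, pvGetB_eq c]
    split
    case isFalse => rfl
    case isTrue hyx' =>
      rw [List.getElem?_modify]
      by_cases hy : y.toNat = y'.toNat
      · have : y = y' := by omega
        subst this
        have hx : x ≠ x' := by
          intro he; exact hne (by rw [he])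
        cases hrow : (getElem? c y.toNat) with
        | none => simp
        | some row =>
          simp only [Option.map_eq_map, Option.map_some, Option.getD_some]
          simp only [if_true]
          rw [List.getElem?_set, if_neg (by omega)]
      · simp only [Option.map_eq_map, hy, if_false]
        cases hrow : (getElem? c y'.toNat) <;> simp

lemma markRel_insert (g : List (List String)) (c : List (List Bool)) (V : Finset (Int × Int))
    (p : Int × Int) (h : MarkRel g c V) (hp : pvInB g p = true) :
    MarkRel g (pvSetB c p.1 p.2) (insert p V) := by
  refine ⟨shaped_setB g c p.1 p.2 h.1, ?_⟩
  intro p'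
  by_cases hpp : p' = p
  · subst hpp
    rw [pvGetB_setB_self g c p' h.1 hp]
    simp
  · have hne : (p'.1, p'.2) ≠ (p.1, p.2) := by
      intro he
      exact hpp (Prod.ext (congrArg Prod.fst he) (congrArg Prod.snd he))
    rw [pvGetB_setB_ne c p.1 p.2 p'.1 p'.2 hne]
    rw [(h.2 p')]
    simp only [Finset.mem_insert]
    tauto

lemma markRel_init (g : List (List String)) :
    MarkRel g (List.replicate g.length (List.replicate (g.headD []).length false)) ∅ := by
  constructor
  · constructor
    · rw [List.length_replicate]
    · intro r hr
      rw [List.eq_of_mem_replicate hr, List.length_replicate]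
  · intro p
    rw [pvGetB_eq]
    simp only [Finset.notMem_empty, or_false]
    rw [← Bool.not_eq_true, pvInB_iff]
    split
    case isFalse hyx =>
      simp only [true_iff]
      intro hcon
      exact hyx ⟨hcon.1, hcon.2.2.1⟩
    case isTrue hyx =>
      rw [List.getElem?_replicate]
      by_cases hy : p.1.toNat < g.length
      · rw [if_pos hy, Option.getD_some, List.getElem?_replicate]
        by_cases hx : p.2.toNat < (g.headD []).length
        · rw [if_pos hx, Option.getD_some]
          constructor
          · intro hcon; simp at hcon
          · intro hcon
            exfalso
            exact hcon ⟨hyx.1, by omega, hyx.2, by omega⟩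
        · rw [if_neg hx]
          simp only [Option.getD_none]
          constructor
          · intro _ hcon; omega
          · intro _; trivial
      · rw [if_neg hy]
        simp only [Option.getD_none, List.getElem?_nil]
        constructor
        · intro _ hcon; omega
        · intro _; trivial

-- ---------- component (saturation) theory ----------
lemma mem_pvGrow (g : List (List String)) (T : Finset (Int × Int)) (x : Int × Int) :
    x ∈ pvGrow g T ↔ x ∈ T ∨ ∃ p ∈ T, x ∈ pvDirs4 p ∧ pvOne g x = true := by
  unfold pvGrow
  simp only [Finset.mem_union, Finset.mem_biUnion, List.mem_toFinset, List.mem_filter]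

lemma pvGrow_subset_self (g : List (List String)) (T : Finset (Int × Int)) : T ⊆ pvGrow g T :=
  Finset.subset_union_left

lemma pvGrow_mono (g : List (List String)) {T U : Finset (Int × Int)} (h : T ⊆ U) :
    pvGrow g T ⊆ pvGrow g U := by
  intro x hx
  rw [mem_pvGrow] at *
  rcases hx with h1 | ⟨p, hp, h2⟩
  · exact Or.inl (h h1)
  · exact Or.inr ⟨p, h hp, h2⟩

lemma pvIter_mono_le (g : List (List String)) (T : Finset (Int × Int)) {k m : Nat} (h : k ≤ m) :
    (pvGrow g)^[k] T ⊆ (pvGrow g)^[m] T := by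
  induction m with
  | zero =>
    have : k = 0 := by omega
    subst this
    exact subset_refl _
  | succ m ih =>
    by_cases hk : k = m + 1
    · subst hk; exact subset_refl _
    · have h2 := ih (by omega)
      rw [Function.iterate_succ_apply']
      exact h2.trans (pvGrow_subset_self g _)

def pvUnivF (g : List (List String)) : Finset (Int × Int) :=
  ((Finset.range g.length) ×ˢ (Finset.range (g.headD []).length)).image
    (fun pq => ((pq.1 : Int), (pq.2 : Int)))

lemma mem_pvUnivF (g : List (List String)) (p : Int × Int) :
    p ∈ pvUnivF g ↔
      (0 ≤ p.1 ∧ p.1 < (g.length : Int) ∧ 0 ≤ p.2 ∧ p.2 < ((g.headD []).length : Int)) := by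
  unfold pvUnivF
  simp only [Finset.mem_image, Finset.mem_product, Finset.mem_range]
  constructor
  · rintro ⟨⟨a, b⟩, ⟨ha, hb⟩, heq⟩
    have h1 : p.1 = (a : Int) := by rw [← heq]
    have h2 : p.2 = (b : Int) := by rw [← heq]
    omega
  · intro ⟨h1, h2, h3, h4⟩
    refine ⟨(p.1.toNat, p.2.toNat), ⟨by omega, by omega⟩, ?_⟩
    have : (((p.1.toNat : Int)), ((p.2.toNat : Int))) = p := by
      rw [Int.toNat_of_nonneg h1, Int.toNat_of_nonneg h3]
    exact this

lemma card_pvUnivF (g : List (List String)) : (pvUnivF g).card = pvN g := by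
  unfold pvUnivF pvN
  rw [Finset.card_image_of_injective _ (by
    intro a b hab
    simp only [Prod.ext_iff] at hab
    exact Prod.ext (by exact_mod_cast hab.1) (by exact_mod_cast hab.2))]
  rw [Finset.card_product, Finset.card_range, Finset.card_range]

lemma pvOne_mem_univ (g : List (List String)) (p : Int × Int) (h : pvOne g p = true) :
    p ∈ pvUnivF g := by
  rw [mem_pvUnivF]
  unfold pvOne at h
  simp only [Bool.and_eq_true] at h
  exact (pvInB_iff g p).mp h.1

lemma pvGrow_subset_univ (g : List (List String)) (T : Finset (Int × Int))
    (h : T ⊆ pvUnivF g) : pvGrow g T ⊆ pvUnivF g := by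
  intro x hx
  rw [mem_pvGrow] at hx
  rcases hx with h1 | ⟨p, _, _, h2⟩
  · exact h h1
  · exact pvOne_mem_univ g x h2

lemma pvIter_subset_univ (g : List (List String)) (s : Int × Int) (hs : pvOne g s = true) :
    ∀ k, (pvGrow g)^[k] {s} ⊆ pvUnivF g := by
  intro k
  induction k with
  | zero => simpa using pvOne_mem_univ g s hs
  | succ k ih =>
    rw [Function.iterate_succ_apply']
    exact pvGrow_subset_univ g _ ih

lemma pvComp_fixed (g : List (List String)) (s : Int × Int) (hs : pvOne g s = true) :
    pvGrow g (pvComp g s) = pvComp g s := by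
  unfold pvComp
  -- pigeonhole: some iterate below pvN g is already a fixed point
  have hfix : ∃ k, k ≤ pvN g ∧ pvGrow g ((pvGrow g)^[k] {s}) = (pvGrow g)^[k] {s} := by
    by_contra hcon
    push Not at hcon
    have hcard : ∀ k, k ≤ pvN g → k + 1 ≤ ((pvGrow g)^[k] {s}).card := by
      intro k
      induction k with
      | zero => intro _; simp
      | succ k ih =>
        intro hk
        have h1 := ih (by omega)
        have hne := hcon k (by omega)
        have hss : (pvGrow g)^[k] {s} ⊂ pvGrow g ((pvGrow g)^[k] {s}) :=
          ssubset_of_subset_of_ne (pvGrow_subset_self g _) (Ne.symm hne)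
        have := Finset.card_lt_card hss
        rw [Function.iterate_succ_apply']
        omega
    have h1 := hcard (pvN g) (le_refl _)
    have h2 := Finset.card_le_card (pvIter_subset_univ g s hs (pvN g))
    rw [card_pvUnivF] at h2
    omega
  obtain ⟨k, hk, hfix⟩ := hfix
  have hst : ∀ m, (pvGrow g)^[k + m] {s} = (pvGrow g)^[k] {s} := by
    intro m
    rw [Nat.add_comm, Function.iterate_add_apply]
    exact Function.iterate_fixed hfix m
  have hN : (pvGrow g)^[pvN g] {s} = (pvGrow g)^[k] {s} := by
    have := hst (pvN g - k)
    rw [Nat.add_sub_cancel' hk] at this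
    exact this
  rw [hN]
  exact hfix

lemma pvIter_subset_comp (g : List (List String)) (s : Int × Int) (hs : pvOne g s = true) :
    ∀ k, (pvGrow g)^[k] {s} ⊆ pvComp g s := by
  intro k
  induction k with
  | zero => exact pvIter_mono_le g _ (Nat.zero_le _)
  | succ k ih =>
    rw [Function.iterate_succ_apply']
    calc pvGrow g ((pvGrow g)^[k] {s}) ⊆ pvGrow g (pvComp g s) := pvGrow_mono g ih
      _ = pvComp g s := pvComp_fixed g s hs

lemma mem_pvComp_self (g : List (List String)) (s : Int × Int) : s ∈ pvComp g s := by
  unfold pvComp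
  have := pvIter_mono_le g ({s} : Finset (Int × Int)) (Nat.zero_le (pvN g))
  exact this (by simp)

lemma pvComp_one (g : List (List String)) (s : Int × Int) (hs : pvOne g s = true) :
    ∀ p ∈ pvComp g s, pvOne g p = true := by
  have aux : ∀ k, ∀ p ∈ (pvGrow g)^[k] ({s} : Finset (Int × Int)), pvOne g p = true := by
    intro k
    induction k with
    | zero => intro p hp; simp at hp; rw [hp]; exact hs
    | succ k ih =>
      intro p hp
      rw [Function.iterate_succ_apply', mem_pvGrow] at hp
      rcases hp with h1 | ⟨q, _, _, h2⟩
      · exact ih p h1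
      · exact h2
  exact aux (pvN g)

lemma pvComp_closed (g : List (List String)) (s : Int × Int) (hs : pvOne g s = true)
    (p n : Int × Int) (hp : p ∈ pvComp g s) (hn : n ∈ pvDirs4 p) (hone : pvOne g n = true) :
    n ∈ pvComp g s := by
  rw [← pvComp_fixed g s hs, mem_pvGrow]
  exact Or.inr ⟨p, hp, hn, hone⟩

lemma pvComp_subset_of_mem (g : List (List String)) (s p : Int × Int)
    (hs : pvOne g s = true) (hp : p ∈ pvComp g s) : pvComp g p ⊆ pvComp g s := by
  have aux : ∀ k, (pvGrow g)^[k] ({p} : Finset (Int × Int)) ⊆ pvComp g s := by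
    intro k
    induction k with
    | zero => intro x hx; simp at hx; rw [hx]; exact hp
    | succ k ih =>
      rw [Function.iterate_succ_apply']
      intro x hx
      rw [mem_pvGrow] at hx
      rcases hx with h1 | ⟨t, ht, h2, h3⟩
      · exact ih h1
      · exact pvComp_closed g s hs t x (ih ht) h2 h3
  exact aux (pvN g)

lemma pvDirs4_symm (p n : Int × Int) (h : n ∈ pvDirs4 p) : p ∈ pvDirs4 n := by
  simp only [pvDirs4, pvBfsDirs, List.map_cons, List.map_nil, List.mem_cons,
    List.not_mem_nil, or_false, Prod.ext_iff] at *
  obtain ⟨n1, n2⟩ := n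
  obtain ⟨p1, p2⟩ := p
  simp only [] at *
  omega

lemma pvComp_symm (g : List (List String)) (s : Int × Int) (hs : pvOne g s = true) :
    ∀ p ∈ pvComp g s, s ∈ pvComp g p := by
  have main : ∀ k, ∀ p ∈ (pvGrow g)^[k] ({s} : Finset (Int × Int)), s ∈ pvComp g p := by
    intro k
    induction k with
    | zero => intro p hp; simp at hp; rw [hp]; exact mem_pvComp_self g s
    | succ k ih =>
      intro p hp
      rw [Function.iterate_succ_apply', mem_pvGrow] at hp
      rcases hp with h1 | ⟨t, ht, h2, h3⟩
      · exact ih p h1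
      · have hts : s ∈ pvComp g t := ih t ht
        have htone : pvOne g t = true :=
          pvComp_one g s hs t (pvIter_subset_comp g s hs k ht)
        have htp : t ∈ pvComp g p := by
          have h4 : t ∈ pvGrow g {p} := by
            rw [mem_pvGrow]
            exact Or.inr ⟨p, by simp, pvDirs4_symm t p h2, htone⟩
          have h5 : pvGrow g {p} = (pvGrow g)^[1] {p} := by
            rw [Function.iterate_one]
          rw [h5] at h4
          exact pvIter_subset_comp g p h3 1 h4
        exact pvComp_subset_of_mem g p t h3 htp hts
  exact main (pvN g)

-- ---------- abstract BFS ----------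
lemma pvAbsFold_spec (S : Finset (Int × Int)) :
    ∀ (ds : List (Int × Int)) (vis : Finset (Int × Int)) (q : List (Int × Int)),
    ∃ news : List (Int × Int),
      (ds.foldl (pvAbsStep S) (vis, q)).1 = vis ∪ news.toFinset ∧
      (ds.foldl (pvAbsStep S) (vis, q)).2 = q ++ news ∧
      news.Nodup ∧
      (∀ n ∈ news, n ∈ S ∧ n ∉ vis ∧ n ∈ ds) ∧
      (∀ n ∈ ds, n ∈ S → n ∈ (ds.foldl (pvAbsStep S) (vis, q)).1) := by
  intro ds
  induction ds with
  | nil =>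
    intro vis q
    exact ⟨[], by simp, by simp, List.nodup_nil, by simp, by simp⟩
  | cons d ds ih =>
    intro vis q
    simp only [List.foldl_cons]
    by_cases hg : d ∈ S ∧ d ∉ vis
    · have hstep : pvAbsStep S (vis, q) d = (insert d vis, q ++ [d]) := by
        unfold pvAbsStep; rw [if_pos hg]
      rw [hstep]
      obtain ⟨news, h1, h2, h3, h4, h5⟩ := ih (insert d vis) (q ++ [d])
      have hvis_sub : insert d vis ⊆ (ds.foldl (pvAbsStep S) (insert d vis, q ++ [d])).1 := by
        rw [h1]; exact Finset.subset_union_left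
      refine ⟨d :: news, ?_, ?_, ?_, ?_, ?_⟩
      · rw [h1]
        ext x
        simp only [Finset.mem_union, Finset.mem_insert, List.toFinset_cons]
        tauto
      · rw [h2, List.append_assoc]
        rfl
      · rw [List.nodup_cons]
        refine ⟨fun hd => ?_, h3⟩
        have := (h4 d hd).2.1
        simp at this
      · intro n hn
        rcases List.mem_cons.mp hn with h | h
        · subst h; exact ⟨hg.1, hg.2, List.mem_cons_self⟩
        · obtain ⟨ha, hb, hc⟩ := h4 n h
          refine ⟨ha, fun hmem => hb (Finset.mem_insert_of_mem hmem), List.mem_cons_of_mem _ hc⟩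
      · intro n hn hnS
        rcases List.mem_cons.mp hn with h | h
        · subst h
          exact hvis_sub (Finset.mem_insert_self _ _)
        · exact h5 n h hnS
    · have hstep : pvAbsStep S (vis, q) d = (vis, q) := by
        unfold pvAbsStep; rw [if_neg hg]
      rw [hstep]
      obtain ⟨news, h1, h2, h3, h4, h5⟩ := ih vis q
      refine ⟨news, h1, h2, h3, ?_, ?_⟩
      · intro n hn
        obtain ⟨ha, hb, hc⟩ := h4 n hn
        exact ⟨ha, hb, List.mem_cons_of_mem _ hc⟩
      · intro n hn hnS
        rcases List.mem_cons.mp hn with h | h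
        · subst h
          have hdv : n ∈ vis := by tauto
          rw [h1]
          exact Finset.mem_union_left _ hdv
        · exact h5 n h hnS

lemma swapF_append (res : List (Int × Int)) (c : Int × Int) :
    swapF (res ++ [(c.2, c.1)]) = swapF res ∪ {c} := by
  unfold swapF
  rw [List.map_append, List.toFinset_append]
  simp

lemma pvAbsLoop_spec (S : Finset (Int × Int)) :
    ∀ (q : List (Int × Int)) (vis : Finset (Int × Int)) (res : List (Int × Int)),
    (∀ c ∈ q, c ∈ vis) → q.Nodup → vis = swapF res ∪ q.toFinset →
    (∀ p ∈ vis, p ∉ q → ∀ n ∈ pvDirs4 p, n ∈ S → n ∈ vis) →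
    vis ⊆ (pvAbsLoop S vis q res).2 ∧
    (pvAbsLoop S vis q res).2 ⊆ vis ∪ S ∧
    (∀ p ∈ (pvAbsLoop S vis q res).2, ∀ n ∈ pvDirs4 p, n ∈ S → n ∈ (pvAbsLoop S vis q res).2) ∧
    (pvAbsLoop S vis q res).2 = swapF (pvAbsLoop S vis q res).1 := by
  intro q vis res
  induction vis, q, res using pvAbsLoop.induct (S := S) with
  | case1 vis res =>
    intro h1 h2 h3 h4
    rw [pvAbsLoop]
    refine ⟨subset_refl _, Finset.subset_union_left, ?_, ?_⟩
    · intro p hp n hn hnS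
      exact h4 p hp (by simp) n hn hnS
    · rw [h3]; simp
  | case2 vis res c q' st ih =>
    intro h1 h2 h3 h4
    obtain ⟨news, f1, f2, f3, f4, f5⟩ := pvAbsFold_spec S (pvDirs4 c) vis q'
    have hq' : ∀ x ∈ q', x ∈ vis := fun x hx => h1 x (List.mem_cons_of_mem _ hx)
    have hnodup' := (List.nodup_cons.mp h2)
    have hvis_st : vis ⊆ ((pvDirs4 c).foldl (pvAbsStep S) (vis, q')).1 := by
      rw [f1]; exact Finset.subset_union_left
    have A1 : ∀ x ∈ ((pvDirs4 c).foldl (pvAbsStep S) (vis, q')).2,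
        x ∈ ((pvDirs4 c).foldl (pvAbsStep S) (vis, q')).1 := by
      intro x hx
      rw [f2] at hx
      rcases List.mem_append.mp hx with h | h
      · exact hvis_st (hq' x h)
      · rw [f1]; exact Finset.mem_union_right _ (List.mem_toFinset.mpr h)
    have A2 : ((pvDirs4 c).foldl (pvAbsStep S) (vis, q')).2.Nodup := by
      rw [f2, List.nodup_append]
      refine ⟨hnodup'.2, f3, ?_⟩
      intro x hx y hy hxy
      exact (f4 y hy).2.1 (hxy ▸ hq' x hx)
    have A3 : ((pvDirs4 c).foldl (pvAbsStep S) (vis, q')).1 =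
        swapF (res ++ [(c.2, c.1)]) ∪ ((pvDirs4 c).foldl (pvAbsStep S) (vis, q')).2.toFinset := by
      rw [f1, f2, swapF_append, h3]
      ext x
      simp only [Finset.mem_union, List.mem_toFinset, List.toFinset_cons, Finset.mem_insert,
        List.mem_append, Finset.mem_singleton]
      tauto
    have A4 : ∀ p ∈ ((pvDirs4 c).foldl (pvAbsStep S) (vis, q')).1,
        p ∉ ((pvDirs4 c).foldl (pvAbsStep S) (vis, q')).2 →
        ∀ n ∈ pvDirs4 p, n ∈ S → n ∈ ((pvDirs4 c).foldl (pvAbsStep S) (vis, q')).1 := by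
      intro p hp hpq n hn hnS
      rw [f1, Finset.mem_union] at hp
      rcases hp with hp | hp
      · by_cases hpc : p = c
        · subst hpc
          exact f5 n hn hnS
        · have hpq' : p ∉ c :: q' := by
            intro hmem
            rcases List.mem_cons.mp hmem with h | h
            · exact hpc h
            · exact hpq (by rw [f2]; exact List.mem_append.mpr (Or.inl h))
          exact hvis_st (h4 p hp hpq' n hn hnS)
      · exfalso
        exact hpq (by rw [f2]; exact List.mem_append.mpr (Or.inr (List.mem_toFinset.mp hp)))
    obtain ⟨C1, C2, C3, C4⟩ := ih A1 A2 A3 A4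
    rw [pvAbsLoop]
    refine ⟨hvis_st.trans C1, ?_, C3, C4⟩
    intro x hx
    have := C2 hx
    rw [Finset.mem_union] at this
    rcases this with h | h
    · rw [f1, Finset.mem_union] at h
      rcases h with h | h
      · exact Finset.mem_union_left _ h
      · exact Finset.mem_union_right _ (f4 x (List.mem_toFinset.mp h)).1
    · exact Finset.mem_union_right _ h

lemma pvRun_visits (g : List (List String)) (s : Int × Int) (hs : pvOne g s = true) :
    (pvAbsLoop (pvComp g s) {s} [s] []).2 = pvComp g s ∧
    swapF (pvRun (pvComp g s) s) = pvComp g s := by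
  have h1 : ∀ c ∈ [s], c ∈ ({s} : Finset (Int × Int)) := by simp
  have h2 : ([s] : List (Int × Int)).Nodup := by simp
  have h3 : ({s} : Finset (Int × Int)) = swapF [] ∪ [s].toFinset := by simp [swapF]
  have h4 : ∀ p ∈ ({s} : Finset (Int × Int)), p ∉ ([s] : List (Int × Int)) →
      ∀ n ∈ pvDirs4 p, n ∈ pvComp g s → n ∈ ({s} : Finset (Int × Int)) := by
    intro p hp hq
    exfalso
    apply hq
    simp only [Finset.mem_singleton] at hp
    simp [hp]
  obtain ⟨C1, C2, C3, C4⟩ := pvAbsLoop_spec (pvComp g s) [s] {s} [] h1 h2 h3 h4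
  have hsub : pvComp g s ⊆ (pvAbsLoop (pvComp g s) {s} [s] []).2 := by
    have aux : ∀ k, (pvGrow g)^[k] ({s} : Finset (Int × Int)) ⊆
        (pvAbsLoop (pvComp g s) {s} [s] []).2 := by
      intro k
      induction k with
      | zero =>
        intro y hy
        simp only [Function.iterate_zero, id_eq, Finset.mem_singleton] at hy
        subst hy
        exact C1 (by simp)
      | succ k ih =>
        rw [Function.iterate_succ_apply']
        intro y hy
        rw [mem_pvGrow] at hy
        rcases hy with h | ⟨t, ht, hdir, honey⟩
        · exact ih h
        · have hyS : y ∈ pvComp g s := by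
            have hy1 : y ∈ (pvGrow g)^[k + 1] ({s} : Finset (Int × Int)) := by
              rw [Function.iterate_succ_apply', mem_pvGrow]
              exact Or.inr ⟨t, ht, hdir, honey⟩
            exact pvIter_subset_comp g s hs (k + 1) hy1
          exact C3 t (ih ht) y hdir hyS
    exact aux (pvN g)
  have hvis : (pvAbsLoop (pvComp g s) {s} [s] []).2 = pvComp g s := by
    apply Finset.Subset.antisymm
    · intro x hx
      have h := C2 hx
      rw [Finset.mem_union] at h
      rcases h with h | h
      · simp only [Finset.mem_singleton] at h
        rw [h]
        exact mem_pvComp_self g s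
      · exact h
    · exact hsub
  refine ⟨hvis, ?_⟩
  unfold pvRun
  rw [← C4, hvis]

-- ---------- simulation: concrete BFS = abstract BFS ----------
lemma pvFold_sim (g : List (List String)) (S V : Finset (Int × Int)) (c : Int × Int)
    (hone : ∀ p ∈ S, pvOne g p = true)
    (hclosed : ∀ p ∈ S, ∀ n ∈ pvDirs4 p, pvOne g n = true → n ∈ S)
    (hdisj : ∀ p ∈ S, p ∉ V)
    (hc : c ∈ S) :
    ∀ (ds : List (Int × Int)), (∀ d ∈ ds, d ∈ pvBfsDirs) →
    ∀ (check : List (List Bool)) (vis : Finset (Int × Int)) (q : List (Int × Int)),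
    MarkRel g check (V ∪ vis) → vis ⊆ S → (∀ x ∈ q, x ∈ S) →
    ((ds.foldl (pvBfsStep g c.1 c.2) (check, q)).2 =
      ((ds.map (fun d => (d.1 + c.1, d.2 + c.2))).foldl (pvAbsStep S) (vis, q)).2) ∧
    MarkRel g (ds.foldl (pvBfsStep g c.1 c.2) (check, q)).1
      (V ∪ ((ds.map (fun d => (d.1 + c.1, d.2 + c.2))).foldl (pvAbsStep S) (vis, q)).1) ∧
    ((ds.map (fun d => (d.1 + c.1, d.2 + c.2))).foldl (pvAbsStep S) (vis, q)).1 ⊆ S ∧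
    (∀ x ∈ ((ds.map (fun d => (d.1 + c.1, d.2 + c.2))).foldl (pvAbsStep S) (vis, q)).2, x ∈ S) := by
  intro ds
  induction ds with
  | nil =>
    intro _ check vis q hm hvs hq
    exact ⟨rfl, hm, hvs, hq⟩
  | cons d ds ih =>
    intro hds check vis q hm hvs hq
    have hdmem : d ∈ pvBfsDirs := hds d List.mem_cons_self
    have hds' : ∀ d' ∈ ds, d' ∈ pvBfsDirs := fun d' hd' => hds d' (List.mem_cons_of_mem _ hd')
    set n : Int × Int := (d.1 + c.1, d.2 + c.2) with hn
    have hnd : n ∈ pvDirs4 c := by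
      unfold pvDirs4
      exact List.mem_map.mpr ⟨d, hdmem, rfl⟩
    simp only [List.map_cons, List.foldl_cons]
    by_cases habs : n ∈ S ∧ n ∉ vis
    · have honen : pvOne g n = true := hone n habs.1
      have hinb : pvInB g n = true := by
        unfold pvOne at honen
        exact (Bool.and_eq_true _ _).mp honen |>.1
      have hcell : pvCellS g n.1 n.2 = "1" := by
        unfold pvOne at honen
        have := (Bool.and_eq_true _ _).mp honen |>.2
        exact of_decide_eq_true this
      have hbounds := (pvInB_iff g n).mp hinb
      have hgb : pvGetB check n.1 n.2 = false := by
        rcases hb : pvGetB check n.1 n.2 with _ | _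
        · rfl
        · exfalso
          have := (hm.2 n).mp hb
          rcases this with h | h
          · rw [hinb] at h; exact Bool.true_eq_false.mp h
          · rw [Finset.mem_union] at h
            rcases h with h | h
            · exact hdisj n habs.1 h
            · exact habs.2 h
      have hcstep : pvBfsStep g c.1 c.2 (check, q) d = (pvSetB check n.1 n.2, q ++ [n]) := by
        unfold pvBfsStep
        dsimp only
        rw [if_pos ⟨hbounds.2.2.1, hbounds.2.2.2, hbounds.1, hbounds.2.1⟩, if_pos ⟨hcell, hgb⟩]
      have hastep : pvAbsStep S (vis, q) n = (insert n vis, q ++ [n]) := by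
        unfold pvAbsStep
        rw [if_pos habs]
      rw [hcstep, hastep]
      have hm' : MarkRel g (pvSetB check n.1 n.2) (V ∪ insert n vis) := by
        have := markRel_insert g check (V ∪ vis) n hm hinb
        rwa [← Finset.union_insert] at this
      exact ih hds' (pvSetB check n.1 n.2) (insert n vis) (q ++ [n]) hm'
        (Finset.insert_subset habs.1 hvs)
        (by
          intro x hx
          rcases List.mem_append.mp hx with h | h
          · exact hq x h
          · simp only [List.mem_singleton] at h
            rw [h]
            exact habs.1)
    · have hastep : pvAbsStep S (vis, q) n = (vis, q) := by
        unfold pvAbsStep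
        rw [if_neg habs]
      have hcstep : pvBfsStep g c.1 c.2 (check, q) d = (check, q) := by
        unfold pvBfsStep
        dsimp only
        split
        case isFalse => rfl
        case isTrue hb =>
          rw [if_neg]
          rintro ⟨hcell, hgb⟩
          have hinb : pvInB g n = true := by
            rw [pvInB_iff]
            exact ⟨hb.2.2.1, hb.2.2.2, hb.1, hb.2.1⟩
          have honen : pvOne g n = true := by
            unfold pvOne
            rw [hinb, hcell]
            simp
          have hnS : n ∈ S := hclosed c hc n hnd honen
          have hnvis : n ∉ vis := by
            intro hmem
            have : pvGetB check n.1 n.2 = true :=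
              (hm.2 n).mpr (Or.inr (Finset.mem_union_right _ hmem))
            rw [this] at hgb
            exact Bool.true_eq_false.mp hgb
          exact habs ⟨hnS, hnvis⟩
      rw [hcstep, hastep]
      exact ih hds' check vis q hm hvs hq

lemma pvSim (g : List (List String)) (S V : Finset (Int × Int))
    (hone : ∀ p ∈ S, pvOne g p = true)
    (hclosed : ∀ p ∈ S, ∀ n ∈ pvDirs4 p, pvOne g n = true → n ∈ S)
    (hdisj : ∀ p ∈ S, p ∉ V) :
    ∀ (q : List (Int × Int)) (check : List (List Bool)) (res : List (Int × Int))
      (vis : Finset (Int × Int)),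
    MarkRel g check (V ∪ vis) → (∀ x ∈ q, x ∈ S) → vis ⊆ S →
    (pvBfsLoop g check q res).1 = (pvAbsLoop S vis q res).1 ∧
    MarkRel g (pvBfsLoop g check q res).2 (V ∪ (pvAbsLoop S vis q res).2) := by
  intro q check res
  induction check, q, res using pvBfsLoop.induct (grid := g) with
  | case1 check res =>
    intro vis hm hq hvs
    rw [pvBfsLoop, pvAbsLoop]
    exact ⟨rfl, hm⟩
  | case2 check res c q' st ih =>
    intro vis hm hq hvs
    have hcS := hq c List.mem_cons_self
    have hqS' : ∀ x ∈ q', x ∈ S := fun x hx => hq x (List.mem_cons_of_mem _ hx)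
    obtain ⟨F1m, F2m, F4m, F5m⟩ := pvFold_sim g S V c hone hclosed hdisj hcS
      pvBfsDirs (fun d hd => hd) check vis q' hm hvs hqS'
    have F1 : st.2 = ((pvDirs4 c).foldl (pvAbsStep S) (vis, q')).2 := F1m
    have F2 : MarkRel g st.1 (V ∪ ((pvDirs4 c).foldl (pvAbsStep S) (vis, q')).1) := F2m
    have F4 : ((pvDirs4 c).foldl (pvAbsStep S) (vis, q')).1 ⊆ S := F4m
    have F5 : ∀ x ∈ ((pvDirs4 c).foldl (pvAbsStep S) (vis, q')).2, x ∈ S := F5m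
    have hq2 : ∀ x ∈ st.2, x ∈ S := by rw [F1]; exact F5
    rw [pvBfsLoop, pvAbsLoop]
    rw [← F1]
    exact ih ((pvDirs4 c).foldl (pvAbsStep S) (vis, q')).1 F2 hq2 F4

lemma pvBfs_spec (g : List (List String)) (check : List (List Bool)) (V : Finset (Int × Int))
    (s : Int × Int) (hm : MarkRel g check V) (hs : pvOne g s = true)
    (hdisjS : ∀ p ∈ pvComp g s, p ∉ V) :
    (pvBfs s.1 s.2 check g).1 = pvRun (pvComp g s) s ∧
    MarkRel g (pvBfs s.1 s.2 check g).2 (V ∪ pvComp g s) := by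
  have hinb : pvInB g s = true := by
    unfold pvOne at hs
    exact (Bool.and_eq_true _ _).mp hs |>.1
  have hm' : MarkRel g (pvSetB check s.1 s.2) (V ∪ {s}) := by
    have := markRel_insert g check V s hm hinb
    rwa [Finset.insert_eq, Finset.union_comm] at this
  obtain ⟨G1, G2⟩ := pvSim g (pvComp g s) V
    (pvComp_one g s hs) (fun p hp n hn h1 => pvComp_closed g s hs p n hp hn h1) hdisjS
    [s] (pvSetB check s.1 s.2) [] {s} hm'
    (by intro x hx; simp only [List.mem_singleton] at hx; rw [hx]; exact mem_pvComp_self g s)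
    (by intro x hx; simp only [Finset.mem_singleton] at hx; rw [hx]; exact mem_pvComp_self g s)
  obtain ⟨hvis, _⟩ := pvRun_visits g s hs
  constructor
  · exact G1
  · rw [hvis] at G2
    exact G2

-- ---------- port-B set layer ----------
lemma mem_foldl_addIf {P : (Int × Int) → Prop} [DecidablePred P] :
    ∀ (xs : List (Int × Int)) (acc : PySem.Set (Int × Int)) (y : Int × Int),
    (y ∈ xs.foldl (fun s n => if P n then PySem.Set.add s n else s) acc ↔
      y ∈ acc ∨ ∃ n ∈ xs, P n ∧ y = n) := by
  intro xs
  induction xs with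
  | nil => intro acc y; simp
  | cons n xs ih =>
    intro acc y
    simp only [List.foldl_cons]
    by_cases hp : P n
    · rw [if_pos hp, ih]
      rw [PySem.Set.mem_add]
      constructor
      · rintro ((h | h) | ⟨m, hm, h1, h2⟩)
        · exact Or.inl h
        · exact Or.inr ⟨n, List.mem_cons_self, hp, h⟩
        · exact Or.inr ⟨m, List.mem_cons_of_mem _ hm, h1, h2⟩
      · rintro (h | ⟨m, hm, h1, h2⟩)
        · exact Or.inl (Or.inl h)
        · rcases List.mem_cons.mp hm with h3 | h3
          · subst h3; exact Or.inl (Or.inr h2)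
          · exact Or.inr ⟨m, h3, h1, h2⟩
    · rw [if_neg hp, ih]
      constructor
      · rintro (h | ⟨m, hm, h1, h2⟩)
        · exact Or.inl h
        · exact Or.inr ⟨m, List.mem_cons_of_mem _ hm, h1, h2⟩
      · rintro (h | ⟨m, hm, h1, h2⟩)
        · exact Or.inl h
        · rcases List.mem_cons.mp hm with h3 | h3
          · subst h3; subst h2; exact absurd h1 hp
          · exact Or.inr ⟨m, h3, h1, h2⟩

lemma altNbrs_eq (a b : Int) : altNbrs a b = pvDirs4 (a, b) := by
  unfold altNbrs pvDirs4 pvBfsDirs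
  simp only [List.map_cons, List.map_nil, List.cons.injEq, Prod.ext_iff, and_true]
  omega

lemma altCnd_iff (g : List (List String)) (n : Int × Int) :
    (0 ≤ n.1 ∧ n.1 < (g.length : Int) ∧ 0 ≤ n.2 ∧ n.2 < ((g.headD []).length : Int) ∧
      pvCellS g n.1 n.2 = "1") ↔ pvOne g n = true := by
  unfold pvOne
  rw [Bool.and_eq_true, pvInB_iff, decide_eq_true_eq]
  tauto

lemma altGrow_mem (g : List (List String)) (comp : PySem.Set (Int × Int)) (y : Int × Int) :
    y ∈ altGrow g g.length (g.headD []).length comp ↔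
      y ∈ comp ∨ ∃ p ∈ comp, y ∈ pvDirs4 p ∧ pvOne g y = true := by
  unfold altGrow
  have main : ∀ (xs : List (Int × Int)) (acc : PySem.Set (Int × Int)),
      (y ∈ xs.foldl (fun grown c =>
        (altNbrs c.1 c.2).foldl (fun grown n =>
          if 0 ≤ n.1 ∧ n.1 < (g.length : Int) ∧ 0 ≤ n.2 ∧ n.2 < ((g.headD []).length : Int) ∧
            pvCellS g n.1 n.2 = "1"
          then PySem.Set.add grown n else grown) grown) acc ↔
        y ∈ acc ∨ ∃ p ∈ xs, y ∈ pvDirs4 p ∧ pvOne g y = true) := by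
    intro xs
    induction xs with
    | nil => intro acc; simp
    | cons p xs ih =>
      intro acc
      simp only [List.foldl_cons]
      rw [ih, mem_foldl_addIf]
      constructor
      · rintro (((h | ⟨n, hn, h1, h2⟩)) | ⟨m, hm, h3, h4⟩)
        · exact Or.inl h
        · subst h2
          rw [altNbrs_eq] at hn
          exact Or.inr ⟨p, List.mem_cons_self, by rwa [Prod.mk.eta] at hn, (altCnd_iff g y).mp h1⟩
        · exact Or.inr ⟨m, List.mem_cons_of_mem _ hm, h3, h4⟩
      · rintro (h | ⟨m, hm, h3, h4⟩)
        · exact Or.inl (Or.inl h)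
        · rcases List.mem_cons.mp hm with h5 | h5
          · subst h5
            refine Or.inl (Or.inr ⟨y, ?_, (altCnd_iff g y).mpr h4, rfl⟩)
            rw [altNbrs_eq, Prod.mk.eta]
            exact h3
          · exact Or.inr ⟨m, h5, h3, h4⟩
  exact main comp comp

lemma altGrow_toFinset (g : List (List String)) (comp : PySem.Set (Int × Int)) :
    (altGrow g g.length (g.headD []).length comp).toFinset = pvGrow g comp.toFinset := by
  ext y
  rw [List.mem_toFinset, altGrow_mem, mem_pvGrow]
  simp only [List.mem_toFinset]

lemma setEqual_iff_toFinset (s t : PySem.Set (Int × Int)) :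
    PySem.Set.equal s t = true ↔ s.toFinset = t.toFinset := by
  rw [PySem.Set.equal_iff]
  constructor
  · intro h; ext x; rw [List.mem_toFinset, List.mem_toFinset]; exact h x
  · intro h x
    have := Finset.ext_iff.mp h x
    rwa [List.mem_toFinset, List.mem_toFinset] at this

lemma altSat_toFinset (g : List (List String)) :
    ∀ (k : Nat) (comp : PySem.Set (Int × Int)),
    (altSat g g.length (g.headD []).length k comp).toFinset = (pvGrow g)^[k] comp.toFinset := by
  intro k
  induction k with
  | zero => intro comp; simp [altSat]
  | succ k ih =>
    intro comp
    rw [altSat]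
    by_cases heq : PySem.Set.equal (altGrow g g.length (g.headD []).length comp) comp = true
    · rw [if_pos heq]
      have hfix : pvGrow g comp.toFinset = comp.toFinset := by
        rw [← altGrow_toFinset g comp]
        exact (setEqual_iff_toFinset _ _).mp heq
      rw [Function.iterate_fixed hfix (k + 1)]
    · rw [if_neg heq, ih, altGrow_toFinset, ← Function.iterate_succ_apply]

lemma setUnion_toFinset (s t : PySem.Set (Int × Int)) :
    (PySem.Set.union s t).toFinset = s.toFinset ∪ t.toFinset := by
  ext x
  rw [List.mem_toFinset, PySem.Set.mem_union, Finset.mem_union, List.mem_toFinset,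
    List.mem_toFinset]

-- ---------- scan index list ----------
def pvIdx (g : List (List String)) : List (Nat × Nat) :=
  (List.range g.length).flatMap (fun i => (List.range (g.headD []).length).map (fun j => (i, j)))

def natlt (a b : Nat × Nat) : Prop := a.1 < b.1 ∨ (a.1 = b.1 ∧ a.2 < b.2)

lemma mem_pvIdx (g : List (List String)) (c : Nat × Nat) :
    c ∈ pvIdx g ↔ c.1 < g.length ∧ c.2 < (g.headD []).length := by
  unfold pvIdx
  rw [List.mem_flatMap]
  constructor
  · rintro ⟨i, hi, hmem⟩
    rw [List.mem_map] at hmem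
    obtain ⟨j, hj, hji⟩ := hmem
    rw [List.mem_range] at hi hj
    rw [← hji]
    exact ⟨hi, hj⟩
  · intro ⟨h1, h2⟩
    exact ⟨c.1, List.mem_range.mpr h1,
      List.mem_map.mpr ⟨c.2, List.mem_range.mpr h2, Prod.mk.eta⟩⟩

lemma pairwise_pvIdx (g : List (List String)) : (pvIdx g).Pairwise natlt := by
  unfold pvIdx
  rw [List.pairwise_flatMap]
  constructor
  · intro i _
    rw [List.pairwise_map]
    refine List.Pairwise.imp ?_ (List.pairwise_lt_range)
    intro a b hab
    exact Or.inr ⟨rfl, hab⟩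
  · refine List.Pairwise.imp ?_ (List.pairwise_lt_range)
    intro a b hab x hx y hy
    rw [List.mem_map] at hx hy
    obtain ⟨jx, _, hjx⟩ := hx
    obtain ⟨jy, _, hjy⟩ := hy
    rw [← hjx, ← hjy]
    exact Or.inl hab

lemma foldl_nested {σ : Type} (f : σ → Nat × Nat → σ) (rows cols : Nat) (init : σ) :
    (List.range rows).foldl (fun st i => (List.range cols).foldl (fun st j => f st (i, j)) st) init =
    ((List.range rows).flatMap (fun i => (List.range cols).map (fun j => (i, j)))).foldl f init := by
  rw [List.foldl_flatMap]
  congr 1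
  funext st i
  rw [List.foldl_map]

-- ---------- the joint scan ----------
def VOf (P : List (Finset (Int × Int) × (Int × Int))) : Finset (Int × Int) :=
  P.foldr (fun pr A => pr.1 ∪ A) ∅

lemma mem_VOf (P : List (Finset (Int × Int) × (Int × Int))) (x : Int × Int) :
    x ∈ VOf P ↔ ∃ pr ∈ P, x ∈ pr.1 := by
  induction P with
  | nil => simp [VOf]
  | cons pr P ih =>
    unfold VOf at *
    simp only [List.foldr_cons, Finset.mem_union, ih, List.mem_cons]
    constructor
    · rintro (h | ⟨pr', h1, h2⟩)
      · exact ⟨pr, Or.inl rfl, h⟩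
      · exact ⟨pr', Or.inr h1, h2⟩
    · rintro ⟨pr', h1 | h1, h2⟩
      · exact Or.inl (h1 ▸ h2)
      · exact Or.inr ⟨pr', h1, h2⟩

lemma VOf_append (P : List (Finset (Int × Int) × (Int × Int)))
    (pr : Finset (Int × Int) × (Int × Int)) : VOf (P ++ [pr]) = VOf P ∪ pr.1 := by
  ext x
  rw [mem_VOf, Finset.mem_union, mem_VOf]
  constructor
  · rintro ⟨pr', h1, h2⟩
    rcases List.mem_append.mp h1 with h | h
    · exact Or.inl ⟨pr', h, h2⟩
    · simp only [List.mem_singleton] at h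
      exact Or.inr (h ▸ h2)
  · rintro (⟨pr', h1, h2⟩ | h)
    · exact ⟨pr', List.mem_append.mpr (Or.inl h1), h2⟩
    · exact ⟨pr, List.mem_append.mpr (Or.inr List.mem_cons_self), h⟩

def ScanInv (g : List (List String)) (P : List (Finset (Int × Int) × (Int × Int))) : Prop :=
  ∀ pr ∈ P, pvOne g pr.2 = true ∧ pr.1 = pvComp g pr.2 ∧ ∀ p ∈ pr.1, rmle pr.2 p

def stepA (g : List (List String)) (st : List (List (Int × Int)) × List (List Bool))
    (c : Nat × Nat) : List (List (Int × Int)) × List (List Bool) :=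
  if pvCellS g (c.1 : Int) (c.2 : Int) = "1" ∧ pvGetB st.2 (c.1 : Int) (c.2 : Int) = false then
    let r := pvBfs (c.1 : Int) (c.2 : Int) st.2 g
    (st.1 ++ [r.1], r.2)
  else st

def stepB (g : List (List String)) (st : List (PySem.Set (Int × Int)) × PySem.Set (Int × Int))
    (c : Nat × Nat) : List (PySem.Set (Int × Int)) × PySem.Set (Int × Int) :=
  if pvCellS g (c.1 : Int) (c.2 : Int) = "1" ∧ ¬ (((c.1 : Int), (c.2 : Int)) ∈ st.2) then
    let comp := altSat g g.length (g.headD []).length (g.length * (g.headD []).length)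
      (PySem.Set.ofList [((c.1 : Int), (c.2 : Int))])
    (st.1 ++ [comp], PySem.Set.union st.2 comp)
  else st

lemma scanA_eq (g : List (List String)) :
    pvScanA g = (pvIdx g).foldl (stepA g)
      ([], List.replicate g.length (List.replicate (g.headD []).length false)) :=
  foldl_nested (stepA g) g.length (g.headD []).length _

lemma scanB_eq (g : List (List String)) :
    altComps g = ((pvIdx g).foldl (stepB g) ([], PySem.Set.empty)).1 :=
  congrArg Prod.fst (foldl_nested (stepB g) g.length (g.headD []).length _)

lemma rmle_refl (p : Int × Int) : rmle p p := Or.inr ⟨rfl, le_refl _⟩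

lemma scan_aux (g : List (List String)) :
    ∀ (rest : List (Nat × Nat)),
    (∀ c ∈ rest, c.1 < g.length ∧ c.2 < (g.headD []).length) →
    rest.Pairwise natlt →
    ∀ (accA : List (List (Int × Int))) (check : List (List Bool))
      (accB : List (PySem.Set (Int × Int))) (seen : PySem.Set (Int × Int))
      (P : List (Finset (Int × Int) × (Int × Int))),
    MarkRel g check (VOf P) →
    seen.toFinset = VOf P →
    ScanInv g P →
    (∀ p : Int × Int, pvOne g p = true →
      (∀ c ∈ rest, ¬(p.1 = (c.1 : Int) ∧ p.2 = (c.2 : Int))) → p ∈ VOf P) →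
    accA = P.map (fun pr => pvRun pr.1 pr.2) →
    accB.map List.toFinset = P.map Prod.fst →
    ∃ P' : List (Finset (Int × Int) × (Int × Int)),
      ScanInv g P' ∧
      (rest.foldl (stepA g) (accA, check)).1 = P'.map (fun pr => pvRun pr.1 pr.2) ∧
      (rest.foldl (stepB g) (accB, seen)).1.map List.toFinset = P'.map Prod.fst := by
  intro rest
  induction rest with
  | nil =>
    intro _ _ accA check accB seen P hm hseen hinv hord hA hB
    exact ⟨P, hinv, hA, hB⟩
  | cons c rest ih =>
    intro hbnd hpw accA check accB seen P hm hseen hinv hord hA hB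
    have hbnd' : ∀ c' ∈ rest, c'.1 < g.length ∧ c'.2 < (g.headD []).length :=
      fun c' hc' => hbnd c' (List.mem_cons_of_mem _ hc')
    have hbc := hbnd c List.mem_cons_self
    have hpw' := (List.pairwise_cons.mp hpw).2
    have hpwc := (List.pairwise_cons.mp hpw).1
    set s : Int × Int := ((c.1 : Int), (c.2 : Int)) with hs_def
    simp only [List.foldl_cons]
    by_cases hk : pvCellS g s.1 s.2 = "1" ∧ s ∉ VOf P
    · -- a new island is discovered at s
      have hsV := hk.2
      have hinb : pvInB g s = true := by
        rw [pvInB_iff]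
        simp only [hs_def]
        refine ⟨by omega, by exact_mod_cast hbc.1, by omega, by exact_mod_cast hbc.2⟩
      have hs1 : pvOne g s = true := by
        unfold pvOne
        rw [hinb, Bool.true_and, decide_eq_true_eq]
        exact hk.1
      have hdisjS : ∀ p ∈ pvComp g s, p ∉ VOf P := by
        intro p hp hpV
        rw [mem_VOf] at hpV
        obtain ⟨pr, hpr, hppr⟩ := hpV
        obtain ⟨hone2, hcomp, _⟩ := hinv pr hpr
        have h1 : s ∈ pvComp g p := pvComp_symm g s hs1 p hp
        have h2 : pvComp g p ⊆ pvComp g pr.2 :=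
          pvComp_subset_of_mem g pr.2 p hone2 (by rw [← hcomp]; exact hppr)
        apply hk.2
        rw [mem_VOf]
        exact ⟨pr, hpr, by rw [hcomp]; exact h2 h1⟩
      have hmin : ∀ p ∈ pvComp g s, rmle s p := by
        intro p hp
        by_contra hnot
        have honep := pvComp_one g s hs1 p hp
        have hnotin : ∀ c' ∈ c :: rest, ¬(p.1 = (c'.1 : Int) ∧ p.2 = (c'.2 : Int)) := by
          intro c' hc' he
          rcases List.mem_cons.mp hc' with h | h
          · subst h
            apply hnot
            have : p = s := Prod.ext he.1 he.2
            rw [this]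
            exact rmle_refl s
          · have hlt := hpwc c' h
            apply hnot
            unfold natlt at hlt
            unfold rmle
            rcases hlt with h1 | ⟨h1, h2⟩
            · left; rw [he.1]; simp only [hs_def]; exact_mod_cast h1
            · right
              constructor
              · rw [he.1]; simp only [hs_def]; exact_mod_cast h1
              · rw [he.2]; simp only [hs_def]
                have : (c.2 : Int) ≤ (c'.2 : Int) := by exact_mod_cast Nat.le_of_lt h2
                exact this
        exact hdisjS p hp (hord p honep hnotin)
      -- A-side step fires
      have hgb : pvGetB check s.1 s.2 = false := by
        rcases hb : pvGetB check s.1 s.2 with _ | _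
        · rfl
        · exfalso
          rcases (hm.2 s).mp hb with h | h
          · rw [hinb] at h; exact Bool.true_eq_false.mp h
          · exact hsV h
      have hstepA : stepA g (accA, check) c = (accA ++ [(pvBfs s.1 s.2 check g).1],
          (pvBfs s.1 s.2 check g).2) := by
        unfold stepA
        rw [if_pos ⟨hk.1, hgb⟩]
      obtain ⟨hrun, hm'⟩ := pvBfs_spec g check (VOf P) s hm hs1 hdisjS
      -- B-side step fires
      have hsseen : ¬ (s ∈ seen) := by
        intro hmem
        apply hsV
        rw [← hseen]
        exact List.mem_toFinset.mpr hmem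
      have hstepB : stepB g (accB, seen) c = (accB ++ [altSat g g.length (g.headD []).length
          (g.length * (g.headD []).length) (PySem.Set.ofList [s])],
          PySem.Set.union seen (altSat g g.length (g.headD []).length
          (g.length * (g.headD []).length) (PySem.Set.ofList [s]))) := by
        unfold stepB
        rw [if_pos ⟨hk.1, hsseen⟩]
      have hcompB : (altSat g g.length (g.headD []).length
          (g.length * (g.headD []).length) (PySem.Set.ofList [s])).toFinset = pvComp g s := by
        rw [altSat_toFinset g (g.length * (g.headD []).length) (PySem.Set.ofList [s])]
        have h1 : PySem.Set.ofList [s] = [s] := rfl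
        rw [h1]
        have h2 : ([s] : List (Int × Int)).toFinset = {s} := by simp
        rw [h2]
        rfl
      rw [hstepA, hstepB]
      apply ih hbnd' hpw' (accA ++ [(pvBfs s.1 s.2 check g).1]) (pvBfs s.1 s.2 check g).2 _ _
        (P ++ [(pvComp g s, s)])
      · rw [VOf_append]
        exact hm'
      · rw [setUnion_toFinset, hseen, VOf_append, hcompB]
      · intro pr hpr
        rcases List.mem_append.mp hpr with h | h
        · exact hinv pr h
        · simp only [List.mem_singleton] at h
          subst h
          exact ⟨hs1, rfl, hmin⟩
      · intro p honep hnotin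
        rw [VOf_append, Finset.mem_union]
        by_cases hps : p = s
        · subst hps
          exact Or.inr (mem_pvComp_self g s)
        · refine Or.inl (hord p honep ?_)
          intro c' hc'
          rcases List.mem_cons.mp hc' with h | h
          · subst h
            intro he
            exact hps (Prod.ext he.1 he.2)
          · exact hnotin c' h
      · rw [List.map_append, hA, hrun]
        rfl
      · rw [List.map_append, List.map_append, hB]
        simp only [List.map_cons, List.map_nil]
        rw [hcompB]
    · -- no new island here: both steps leave the state unchanged
      have hstepA : stepA g (accA, check) c = (accA, check) := by
        unfold stepA
        rw [if_neg]
        rintro ⟨hcell, hgb⟩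
        apply hk
        refine ⟨hcell, ?_⟩
        intro hV
        have : pvGetB check s.1 s.2 = true := (hm.2 s).mpr (Or.inr hV)
        rw [this] at hgb
        exact Bool.true_eq_false.mp hgb
      have hstepB : stepB g (accB, seen) c = (accB, seen) := by
        unfold stepB
        rw [if_neg]
        rintro ⟨hcell, hseen2⟩
        apply hk
        refine ⟨hcell, ?_⟩
        intro hV
        apply hseen2
        rw [← List.mem_toFinset, hseen]
        exact hV
      rw [hstepA, hstepB]
      apply ih hbnd' hpw' accA check accB seen P hm hseen hinv _ hA hB
      intro p honep hnotin
      by_cases hps : p = s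
      · subst hps
        by_cases hv : s ∈ VOf P
        · exact hv
        · exfalso
          apply hk
          refine ⟨?_, hv⟩
          unfold pvOne at honep
          rw [Bool.and_eq_true, decide_eq_true_eq] at honep
          exact honep.2
      · apply hord p honep
        intro c' hc'
        rcases List.mem_cons.mp hc' with h | h
        · subst h
          intro he
          exact hps (Prod.ext he.1 he.2)
        · exact hnotin c' h

lemma scan_spec (g : List (List String)) :
    ∃ P : List (Finset (Int × Int) × (Int × Int)),
      ScanInv g P ∧
      (pvScanA g).1 = P.map (fun pr => pvRun pr.1 pr.2) ∧
      (altComps g).map List.toFinset = P.map Prod.fst := by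
  have hord0 : ∀ p : Int × Int, pvOne g p = true →
      (∀ c ∈ pvIdx g, ¬(p.1 = (c.1 : Int) ∧ p.2 = (c.2 : Int))) → p ∈ VOf [] := by
    intro p hone hnot
    exfalso
    have hin := (pvInB_iff g p).mp (by
      unfold pvOne at hone
      exact (Bool.and_eq_true _ _).mp hone |>.1)
    apply hnot (p.1.toNat, p.2.toNat)
    · rw [mem_pvIdx]
      constructor <;> [skip; skip] <;> simp only [] <;> omega
    · constructor <;> simp only [] <;> omega
  obtain ⟨P, hinv, hA, hB⟩ := scan_aux g (pvIdx g)
    (fun c hc => (mem_pvIdx g c).mp hc) (pairwise_pvIdx g)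
    [] (List.replicate g.length (List.replicate (g.headD []).length false)) [] PySem.Set.empty []
    (markRel_init g) (by simp [VOf, PySem.Set.empty])
    (fun pr hpr => absurd hpr (by simp)) hord0 rfl rfl
  refine ⟨P, hinv, ?_, ?_⟩
  · rw [scanA_eq]; exact hA
  · rw [scanB_eq]; exact hB

lemma rmle_antisymm (a b : Int × Int) (h1 : rmle a b) (h2 : rmle b a) : a = b := by
  unfold rmle at h1 h2
  refine Prod.ext ?_ ?_ <;> omega

lemma pvRun_inj (g g' : List (List String)) (pr1 pr2 : Finset (Int × Int) × (Int × Int))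
    (h1 : pvOne g pr1.2 = true) (hc1 : pr1.1 = pvComp g pr1.2) (hm1 : ∀ p ∈ pr1.1, rmle pr1.2 p)
    (h2 : pvOne g' pr2.2 = true) (hc2 : pr2.1 = pvComp g' pr2.2) (hm2 : ∀ p ∈ pr2.1, rmle pr2.2 p) :
    pvRun pr1.1 pr1.2 = pvRun pr2.1 pr2.2 ↔ pr1.1 = pr2.1 := by
  have e1 : swapF (pvRun pr1.1 pr1.2) = pr1.1 := by
    rw [hc1]
    exact (pvRun_visits g pr1.2 h1).2
  have e2 : swapF (pvRun pr2.1 pr2.2) = pr2.1 := by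
    rw [hc2]
    exact (pvRun_visits g' pr2.2 h2).2
  constructor
  · intro h
    rw [← e1, ← e2, h]
  · intro h
    have hs1 : pr1.2 ∈ pr1.1 := by rw [hc1]; exact mem_pvComp_self g pr1.2
    have hs2 : pr2.2 ∈ pr2.1 := by rw [hc2]; exact mem_pvComp_self g' pr2.2
    have heq : pr1.2 = pr2.2 := by
      apply rmle_antisymm
      · exact hm1 pr2.2 (by rw [h]; exact hs2)
      · exact hm2 pr1.2 (by rw [← h]; exact hs1)
    rw [h, heq]

lemma countMatches_eq_alt (grid1 grid2 : List (List String)) :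
    countMatches grid1 grid2 = countMatches_alt grid1 grid2 := by
  obtain ⟨P1, hinv1, hA1, hB1⟩ := scan_spec grid1
  obtain ⟨P2, hinv2, hA2, hB2⟩ := scan_spec grid2
  have hEqA : countMatches grid1 grid2 =
      (pvScanA grid1).1.foldl
        (fun a i => if i ∈ (pvScanA grid2).1 then a + 1 else a) 0 := rfl
  have hEqB : countMatches_alt grid1 grid2 =
      ((altComps grid1).map
        (fun c => if ((altComps grid2).any (fun s => PySem.Set.equal c s)) then (1 : Int)
          else 0)).sum := rfl
  rw [hEqA, hEqB]
  rw [show (fun (a : Int) (i : List (Int × Int)) =>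
      if i ∈ (pvScanA grid2).1 then a + 1 else a) =
      (fun (acc : Int) (x : List (Int × Int)) =>
        if (fun l => decide (l ∈ (pvScanA grid2).1)) x = true then acc + 1 else acc) from by
    funext a x
    simp]
  rw [PySem.List.foldl_count_if (fun l => decide (l ∈ (pvScanA grid2).1)) _ 0]
  rw [PySem.List.sum_map_ite_one_zero]
  rw [Int.zero_add]
  congr 1
  rw [hA1, hA2]
  rw [List.countP_map]
  have hstep1 : (altComps grid1).countP
      (fun c => (altComps grid2).any (fun s => PySem.Set.equal c s)) =
      (altComps grid1).countP
      (fun c => decide (∃ pr2 ∈ P2, c.toFinset = pr2.1)) := by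
    apply List.countP_congr
    intro c _
    rw [List.any_eq_true, decide_eq_true_eq]
    constructor
    · rintro ⟨s2, hs2, heq⟩
      have hT : s2.toFinset ∈ (altComps grid2).map List.toFinset :=
        List.mem_map.mpr ⟨s2, hs2, rfl⟩
      rw [hB2] at hT
      obtain ⟨pr2, hpr2, hfst⟩ := List.mem_map.mp hT
      exact ⟨pr2, hpr2, by rw [(setEqual_iff_toFinset c s2).mp heq, hfst]⟩
    · rintro ⟨pr2, hpr2, heq⟩
      have hT : pr2.1 ∈ (altComps grid2).map List.toFinset := by
        rw [hB2]
        exact List.mem_map.mpr ⟨pr2, hpr2, rfl⟩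
      obtain ⟨s2, hs2, hfst⟩ := List.mem_map.mp hT
      exact ⟨s2, hs2, (setEqual_iff_toFinset c s2).mpr (by rw [heq, hfst])⟩
  rw [hstep1]
  have hstep2 : (altComps grid1).countP
      (fun c => decide (∃ pr2 ∈ P2, c.toFinset = pr2.1)) =
      ((altComps grid1).map List.toFinset).countP (fun T => decide (∃ pr2 ∈ P2, T = pr2.1)) := by
    rw [List.countP_map]
    rfl
  rw [hstep2, hB1, List.countP_map]
  apply List.countP_congr
  intro pr1 hpr1
  simp only [Function.comp_apply, decide_eq_true_eq]
  rw [List.mem_map]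
  obtain ⟨ho1, hc1, hm1⟩ := hinv1 pr1 hpr1
  constructor
  · rintro ⟨pr2, hpr2, heq⟩
    obtain ⟨ho2, hc2, hm2⟩ := hinv2 pr2 hpr2
    exact ⟨pr2, hpr2,
      ((pvRun_inj grid2 grid1 pr2 pr1 ho2 hc2 hm2 ho1 hc1 hm1).mp heq).symm⟩
  · rintro ⟨pr2, hpr2, heq⟩
    obtain ⟨ho2, hc2, hm2⟩ := hinv2 pr2 hpr2
    exact ⟨pr2, hpr2,
      (pvRun_inj grid2 grid1 pr2 pr1 ho2 hc2 hm2 ho1 hc1 hm1).mpr heq.symm⟩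

-- ===== VERDICT (by name: the statement is the Claim_ definition above) =====
theorem countMatches_spec : Claim_equal_countMatches := by
  intro grid1 grid2 _ _
  unfold Spec_countMatches
  exact countMatches_eq_alt grid1 grid2
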